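-- pv_equiv track=rewrite | github.com/andy1li/adventofcode | 2018/day20_reg_map.py | parse
-- ===== SOURCE A (Python) =====
-- from collections import defaultdict, deque
-- from typing import NamedTuple
--
-- class Pos(NamedTuple):
--     y: int; x: int
--
--     def go(self, elta):
--         D = {'N': Pos(1,  0), 'S': Pos(-1, 0),
--              'W': Pos(0, -1), 'E': Pos( 0, 1)}
--         return Pos(
--             self.y + D[elta].y,
--             self.x + D[elta].x
--         )
--
-- def parse(regex):
--     MAP = defaultdict(set)
--     stack, curr = [], Pos(0, 0)
--     for c in regex:
--         if   c == '(': stack.append(curr)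
--         elif c == '|': curr = stack[-1]
--         elif c == ')': curr = stack.pop()
--         elif c in 'NSWE':
--             next = curr.go(c)
--             MAP[curr].add(next)
--             curr = next
--     return MAP
-- ===== SOURCE B (Python) =====
-- from collections import defaultdict
-- from typing import NamedTuple
--
-- class Pos(NamedTuple):
--     y: int; x: int
--
--     def go(self, elta):
--         D = {'N': Pos(1,  0), 'S': Pos(-1, 0),
--              'W': Pos(0, -1), 'E': Pos( 0, 1)}
--         return Pos(
--             self.y + D[elta].y,
--             self.x + D[elta].x
--         )
--
-- def parse(regex):
--     # Recursive-descent parser: seq consumes doors until '|', ')' or the end;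
--     # '(' recurses, each '|'-alternative restarting from the position saved at '('.
--     MAP = defaultdict(set)
--
--     def seq(i, curr):
--         while i < len(regex):
--             c = regex[i]
--             if c == '|' or c == ')':
--                 return i
--             if c == '(':
--                 save = curr
--                 i += 1
--                 while True:
--                     i = seq(i, save)
--                     if i < len(regex) and regex[i] == '|':
--                         i += 1
--                     else:
--                         break
--                 if i < len(regex):   # consume the matching ')'
--                     i += 1
--                 curr = save
--                 continue
--             if c in 'NSWE':
--                 nxt = curr.go(c)
--                 MAP[curr].add(nxt)
--                 curr = nxt
--             i += 1
--         return i
--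
--     if seq(0, Pos(0, 0)) < len(regex):
--         # stray ')' or '|' at parenthesis depth 0: malformed input
--         raise IndexError("unmatched ')' or '|'")
--     return MAP
-- ===== Notes on version B (the rewrite author's own statement) =====
-- stated objective: alternative
-- what changed: Replaces A's single-pass explicit-stack machine (push on '(', peek on '|', pop on ')') by a recursive-descent parser: a position index and a seq helper that consumes doors and recurses on '(' with each '|'-alternative restarting from the position saved at the '('.
import Mathlib
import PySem

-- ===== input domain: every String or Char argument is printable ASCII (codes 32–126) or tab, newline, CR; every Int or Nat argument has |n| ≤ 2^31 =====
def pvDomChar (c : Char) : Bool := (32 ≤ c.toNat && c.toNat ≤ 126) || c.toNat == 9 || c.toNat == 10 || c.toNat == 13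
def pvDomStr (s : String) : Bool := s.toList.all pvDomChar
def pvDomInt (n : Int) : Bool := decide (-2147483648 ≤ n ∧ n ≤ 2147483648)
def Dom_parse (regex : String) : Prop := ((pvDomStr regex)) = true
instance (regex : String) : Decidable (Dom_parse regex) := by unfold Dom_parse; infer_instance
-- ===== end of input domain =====

-- B re-implements A's single-pass stack machine as a recursive-descent parser ('alternative');
-- on malformed input (')'/'|' at paren depth 0) both Pythons raise IndexError — excluded by Pre_.

-- ===== PORT A =====
-- shared helper: Pos.go (both Pythons use the same Pos class)
def goP (p : Int × Int) (c : Char) : Int × Int :=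
  let D : PySem.Dict Char (Int × Int) :=
    PySem.Dict.ofList [('N', (1, 0)), ('S', (-1, 0)), ('W', (0, -1)), ('E', (0, 1))]
  let d := D.getD c (0, 0)   -- KeyError impossible: every call site has c ∈ "NSWE"
  (p.1 + d.1, p.2 + d.2)

-- shared helper: MAP[curr].add(next) on a defaultdict(set) (the same line in both Pythons)
def addEdge (m : PySem.Dict (Int × Int) (PySem.Set (Int × Int))) (a b : Int × Int) :
    PySem.Dict (Int × Int) (PySem.Set (Int × Int)) :=
  m.modify a PySem.Set.empty (fun s => PySem.Set.add s b)

-- shared helper: the returned defaultdict as an association list (both Pythons return MAP)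
def dictToOut (m : PySem.Dict (Int × Int) (PySem.Set (Int × Int))) :
    List (Int × Int × List (Int × Int)) :=
  m.items.map (fun p => (p.1.1, p.1.2, p.2))

-- A's loop body; the stack is kept head-first (append/[-1]/pop at the head).
-- stack.headD/tail on an empty stack is Python's IndexError: unreachable under Pre_parse.
def stepA (st : List (Int × Int) × (Int × Int) × PySem.Dict (Int × Int) (PySem.Set (Int × Int)))
    (c : Char) : List (Int × Int) × (Int × Int) × PySem.Dict (Int × Int) (PySem.Set (Int × Int)) :=
  let stack := st.1; let curr := st.2.1; let m := st.2.2
  if c = '(' then (curr :: stack, curr, m)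
  else if c = '|' then (stack, stack.headD curr, m)
  else if c = ')' then (stack.tail, stack.headD curr, m)
  else if c = 'N' ∨ c = 'S' ∨ c = 'W' ∨ c = 'E' then
    let nxt := goP curr c
    (stack, nxt, addEdge m curr nxt)
  else st

def parse (regex : String) : List (Int × Int × List (Int × Int)) :=
  dictToOut (List.foldl stepA ([], (0, 0), PySem.Dict.empty) regex.toList).2.2

-- ===== PORT B =====
-- seqF: B's seq — consume doors until '|', ')' or the end; '(' recurses via altsF.
-- altsF: B's inner alternatives loop — one '|'-separated branch at a time, each restarting at save.
-- fuel only makes the mutual recursion structural; parse_alt supplies enough (2·len+2) for all calls.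
-- (B's final IndexError on a leftover ')'/'|' is Python-side only: it fires exactly outside
-- Pre_parse, where nothing is claimed.)
mutual
def seqF : Nat → List Char → (Int × Int) → PySem.Dict (Int × Int) (PySem.Set (Int × Int)) →
    List Char × (Int × Int) × PySem.Dict (Int × Int) (PySem.Set (Int × Int))
  | 0, cs, curr, m => (cs, curr, m)
  | _ + 1, [], curr, m => ([], curr, m)
  | fuel + 1, ch :: rest, curr, m =>
      if ch = ')' ∨ ch = '|' then (ch :: rest, curr, m)
      else if ch = '(' then
        match altsF fuel rest curr m with
        | (rs, m') => seqF fuel rs curr m'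
      else if ch = 'N' ∨ ch = 'S' ∨ ch = 'W' ∨ ch = 'E' then
        let nxt := goP curr ch
        seqF fuel rest nxt (addEdge m curr nxt)
      else seqF fuel rest curr m

def altsF : Nat → List Char → (Int × Int) → PySem.Dict (Int × Int) (PySem.Set (Int × Int)) →
    List Char × PySem.Dict (Int × Int) (PySem.Set (Int × Int))
  | 0, cs, _, m => (cs, m)
  | fuel + 1, cs, save, m =>
      match seqF fuel cs save m with
      | ('|' :: rs, _, m') => altsF fuel rs save m'
      | (')' :: rs, _, m') => (rs, m')
      | (_, _, m') => ([], m')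
end

def parse_alt (regex : String) : List (Int × Int × List (Int × Int)) :=
  dictToOut (seqF (2 * regex.toList.length + 2) regex.toList (0, 0) PySem.Dict.empty).2.2

-- ===== PRECONDITION & SPEC =====
-- prefix counts of '(' and ')'
def opensC (l : List Char) : Nat := l.count '('
def closesC (l : List Char) : Nat := l.count ')'

-- Pre_ excludes exactly the inputs where both Pythons raise IndexError: a ')' or '|' at paren
-- depth 0 (A: stack[-1]/pop on an empty stack; B: its explicit malformed-input check).
-- A (and B) return on every other string.
def Pre_parse (regex : String) : Prop :=
  ∀ i, i < regex.toList.length →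
    (regex.toList.getD i ' ' = ')' ∨ regex.toList.getD i ' ' = '|') →
    closesC (regex.toList.take i) < opensC (regex.toList.take i)
instance (regex : String) : Decidable (Pre_parse regex) := by unfold Pre_parse; infer_instance

def pvWitness_parse : String := "N(E|W(N|S))E"

def Spec_parse (regex : String) (out : List (Int × Int × List (Int × Int))) : Prop := out = parse_alt regex
instance (regex : String) (out : List (Int × Int × List (Int × Int))) : Decidable (Spec_parse regex out) := by unfold Spec_parse; infer_instance

-- ===== CLAIM (what is proved, stated in full; the proofs are below) =====
def Claim_equal_parse : Prop := ∀ (regex : String), Dom_parse regex → Pre_parse regex → Spec_parse regex (parse regex)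

-- ===== LEMMAS AND PROOFS =====

-- what seqF guarantees, relative to A's fold run with any stack s below:
-- it stops at [] with A's map, or at a ')'/'|' with A's whole state, having consumed a
-- paren-balanced prefix.
def SeqGood (fuel : Nat) (cs : List Char) (curr : Int × Int)
    (m : PySem.Dict (Int × Int) (PySem.Set (Int × Int))) (s : List (Int × Int)) : Prop :=
  ∀ rest c' m', seqF fuel cs curr m = (rest, c', m') →
    rest.length ≤ cs.length ∧
    ((rest = [] ∧ (List.foldl stepA (s, curr, m) cs).2.2 = m') ∨
     (∃ pre t, cs = pre ++ rest ∧ (rest = ')' :: t ∨ rest = '|' :: t) ∧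
        opensC pre = closesC pre ∧
        List.foldl stepA (s, curr, m) cs = List.foldl stepA (s, c', m') rest))

-- what altsF guarantees: it consumes a prefix with one unmatched ')' and hands A's state
-- (stack popped back to s, curr reset to save) on, or hits the end with A's map.
def AltsGood (fuel : Nat) (cs : List Char) (save : Int × Int)
    (m : PySem.Dict (Int × Int) (PySem.Set (Int × Int))) (s : List (Int × Int)) : Prop :=
  ∀ rs m', altsF fuel cs save m = (rs, m') →
    rs.length ≤ cs.length ∧
    ((rs = [] ∧ (List.foldl stepA (save :: s, save, m) cs).2.2 = m') ∨
     (∃ pre, cs = pre ++ rs ∧ closesC pre = opensC pre + 1 ∧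
        List.foldl stepA (save :: s, save, m) cs = List.foldl stepA (s, save, m') rs))

-- reduction lemmas for the ports' branch structure
theorem stepA_open (st : List (Int × Int) × (Int × Int) × PySem.Dict (Int × Int) (PySem.Set (Int × Int))) :
    stepA st '(' = (st.2.1 :: st.1, st.2.1, st.2.2) := by simp [stepA]

theorem stepA_bar (st : List (Int × Int) × (Int × Int) × PySem.Dict (Int × Int) (PySem.Set (Int × Int))) :
    stepA st '|' = (st.1, st.1.headD st.2.1, st.2.2) := by simp [stepA]

theorem stepA_close (st : List (Int × Int) × (Int × Int) × PySem.Dict (Int × Int) (PySem.Set (Int × Int))) :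
    stepA st ')' = (st.1.tail, st.1.headD st.2.1, st.2.2) := by simp [stepA]

theorem stepA_move (st : List (Int × Int) × (Int × Int) × PySem.Dict (Int × Int) (PySem.Set (Int × Int)))
    (ch : Char) (h : ch = 'N' ∨ ch = 'S' ∨ ch = 'W' ∨ ch = 'E') :
    stepA st ch = (st.1, goP st.2.1 ch, addEdge st.2.2 st.2.1 (goP st.2.1 ch)) := by
  rcases h with h | h | h | h <;> subst h <;> simp [stepA]

theorem stepA_skip (st : List (Int × Int) × (Int × Int) × PySem.Dict (Int × Int) (PySem.Set (Int × Int)))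
    (ch : Char) (h1 : ¬(ch = ')' ∨ ch = '|')) (h2 : ch ≠ '(')
    (h3 : ¬(ch = 'N' ∨ ch = 'S' ∨ ch = 'W' ∨ ch = 'E')) :
    stepA st ch = st := by
  have h1' := h1; have h3' := h3
  simp only [not_or] at h1' h3'
  simp [stepA, h1'.1, h1'.2, h2, h3'.1, h3'.2.1, h3'.2.2.1, h3'.2.2.2]

theorem seqF_stop (fuel : Nat) (ch : Char) (rest : List Char) (curr : Int × Int)
    (m : PySem.Dict (Int × Int) (PySem.Set (Int × Int))) (h : ch = ')' ∨ ch = '|') :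
    seqF (fuel + 1) (ch :: rest) curr m = (ch :: rest, curr, m) := by
  rcases h with h | h <;> subst h <;> simp [seqF]

theorem seqF_open (fuel : Nat) (rest rs : List Char) (curr : Int × Int)
    (m m1 : PySem.Dict (Int × Int) (PySem.Set (Int × Int)))
    (hra : altsF fuel rest curr m = (rs, m1)) :
    seqF (fuel + 1) ('(' :: rest) curr m = seqF fuel rs curr m1 := by
  simp [seqF, hra]

theorem seqF_move (fuel : Nat) (ch : Char) (rest : List Char) (curr : Int × Int)
    (m : PySem.Dict (Int × Int) (PySem.Set (Int × Int)))
    (h : ch = 'N' ∨ ch = 'S' ∨ ch = 'W' ∨ ch = 'E') :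
    seqF (fuel + 1) (ch :: rest) curr m =
      seqF fuel rest (goP curr ch) (addEdge m curr (goP curr ch)) := by
  rcases h with h | h | h | h <;> subst h <;> simp [seqF]

theorem seqF_skip (fuel : Nat) (ch : Char) (rest : List Char) (curr : Int × Int)
    (m : PySem.Dict (Int × Int) (PySem.Set (Int × Int)))
    (h1 : ¬(ch = ')' ∨ ch = '|')) (h2 : ch ≠ '(')
    (h3 : ¬(ch = 'N' ∨ ch = 'S' ∨ ch = 'W' ∨ ch = 'E')) :
    seqF (fuel + 1) (ch :: rest) curr m = seqF fuel rest curr m := by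
  simp [seqF, h1, h2, h3]

theorem altsF_bar (fuel : Nat) (cs rs : List Char) (save c' : Int × Int)
    (m m1 : PySem.Dict (Int × Int) (PySem.Set (Int × Int)))
    (h : seqF fuel cs save m = ('|' :: rs, c', m1)) :
    altsF (fuel + 1) cs save m = altsF fuel rs save m1 := by
  simp [altsF, h]

theorem altsF_close (fuel : Nat) (cs rs : List Char) (save c' : Int × Int)
    (m m1 : PySem.Dict (Int × Int) (PySem.Set (Int × Int)))
    (h : seqF fuel cs save m = (')' :: rs, c', m1)) :
    altsF (fuel + 1) cs save m = (rs, m1) := by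
  simp [altsF, h]

theorem altsF_nil (fuel : Nat) (cs : List Char) (save c' : Int × Int)
    (m m1 : PySem.Dict (Int × Int) (PySem.Set (Int × Int)))
    (h : seqF fuel cs save m = ([], c', m1)) :
    altsF (fuel + 1) cs save m = ([], m1) := by
  simp [altsF, h]

theorem mainAux (fuel : Nat) :
    (∀ cs curr m s, 2 * cs.length + 1 ≤ fuel → SeqGood fuel cs curr m s) ∧
    (∀ cs save m s, 2 * cs.length + 2 ≤ fuel → AltsGood fuel cs save m s) := by
  induction fuel with
  | zero => constructor <;> intro cs _ _ _ h <;> omega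
  | succ n ih =>
    obtain ⟨ihS, ihA⟩ := ih
    constructor
    · -- SeqGood (n+1)
      intro cs curr m s hfuel rest' c' m' hr
      cases cs with
      | nil =>
        simp [seqF] at hr
        obtain ⟨h1, h2, h3⟩ := hr
        subst h1; subst h2; subst h3
        exact ⟨by simp, Or.inl ⟨rfl, rfl⟩⟩
      | cons ch rest =>
        by_cases h1 : ch = ')' ∨ ch = '|'
        · rw [seqF_stop n ch rest curr m h1] at hr
          simp only [Prod.mk.injEq] at hr
          obtain ⟨e1, e2, e3⟩ := hr
          subst e1; subst e2; subst e3
          refine ⟨le_refl _, Or.inr ⟨[], rest, by simp, ?_, rfl, rfl⟩⟩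
          rcases h1 with h | h <;> subst h
          · exact Or.inl rfl
          · exact Or.inr rfl
        · by_cases h2 : ch = '('
          · subst h2
            rcases hra : altsF n rest curr m with ⟨rs, m1⟩
            have hfa : 2 * rest.length + 2 ≤ n := by simp at hfuel; omega
            have HA := ihA rest curr m s hfa rs m1 hra
            rw [seqF_open n rest rs curr m m1 hra] at hr
            rcases hrb : seqF n rs curr m1 with ⟨rest2, c2, m2⟩
            have HS := ihS rs curr m1 s (by have := HA.1; simp at hfuel; omega) rest2 c2 m2 hrb
            rw [hrb] at hr
            simp only [Prod.mk.injEq] at hr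
            obtain ⟨e1, e2, e3⟩ := hr
            subst e1; subst e2; subst e3
            have hfold : List.foldl stepA (s, curr, m) ('(' :: rest)
                = List.foldl stepA (curr :: s, curr, m) rest := by
              simp [List.foldl_cons, stepA_open]
            rcases HA.2 with ⟨hrsnil, hmapA⟩ | ⟨preA, hcsA, hbalA, hfoldA⟩
            · subst hrsnil
              have h0 : rest2 = [] := List.eq_nil_of_length_eq_zero (Nat.le_zero.mp HS.1)
              subst h0
              have hm2 : m1 = m2 := by
                rcases HS.2 with ⟨-, hx⟩ | ⟨pre, t, -, hsh, -, -⟩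
                · simpa using hx
                · rcases hsh with h | h <;> simp at h
              refine ⟨by simp, Or.inl ⟨rfl, ?_⟩⟩
              rw [hfold, hmapA]; exact hm2
            · rcases HS.2 with ⟨h2nil, hmapS⟩ | ⟨preS, tS, hcsS, hshS, hbalS, hfoldS⟩
              · subst h2nil
                refine ⟨by simp, Or.inl ⟨rfl, ?_⟩⟩
                rw [hfold, hfoldA]; exact hmapS
              · refine ⟨?_, Or.inr ⟨'(' :: (preA ++ preS), tS, ?_, hshS, ?_, ?_⟩⟩
                · have := HS.1; have := HA.1; simp; omega
                · simp [hcsA, hcsS]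
                · simp only [opensC, closesC] at hbalA hbalS ⊢
                  simp [List.count_append]
                  omega
                · rw [hfold, hfoldA, hfoldS]
          · by_cases h3 : ch = 'N' ∨ ch = 'S' ∨ ch = 'W' ∨ ch = 'E'
            · rw [seqF_move n ch rest curr m h3] at hr
              have HS := ihS rest (goP curr ch) (addEdge m curr (goP curr ch)) s
                (by simp at hfuel; omega) rest' c' m' hr
              have hfold : List.foldl stepA (s, curr, m) (ch :: rest)
                  = List.foldl stepA (s, goP curr ch, addEdge m curr (goP curr ch)) rest := by
                simp [List.foldl_cons, stepA_move _ ch h3]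
              refine ⟨by have := HS.1; simp; omega, ?_⟩
              have hne1 : ch ≠ '(' := h2
              have hne2 : ch ≠ ')' := by simp only [not_or] at h1; exact h1.1
              rcases HS.2 with ⟨hnil, hmap⟩ | ⟨pre, t, hcs2, hsh, hbal, hfoldS⟩
              · exact Or.inl ⟨hnil, by rw [hfold]; exact hmap⟩
              · refine Or.inr ⟨ch :: pre, t, by simp [hcs2], hsh, ?_,
                  by rw [hfold]; exact hfoldS⟩
                simp only [opensC, closesC] at hbal ⊢
                simp [hne1, hne2]
                omega
            · rw [seqF_skip n ch rest curr m h1 h2 h3] at hr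
              have HS := ihS rest curr m s (by simp at hfuel; omega) rest' c' m' hr
              have hfold : List.foldl stepA (s, curr, m) (ch :: rest)
                  = List.foldl stepA (s, curr, m) rest := by
                simp [List.foldl_cons, stepA_skip _ ch h1 h2 h3]
              refine ⟨by have := HS.1; simp; omega, ?_⟩
              have hne1 : ch ≠ '(' := h2
              have hne2 : ch ≠ ')' := by simp only [not_or] at h1; exact h1.1
              rcases HS.2 with ⟨hnil, hmap⟩ | ⟨pre, t, hcs2, hsh, hbal, hfoldS⟩
              · exact Or.inl ⟨hnil, by rw [hfold]; exact hmap⟩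
              · refine Or.inr ⟨ch :: pre, t, by simp [hcs2], hsh, ?_,
                  by rw [hfold]; exact hfoldS⟩
                simp only [opensC, closesC] at hbal ⊢
                simp [hne1, hne2]
                omega
    · -- AltsGood (n+1)
      intro cs save m s hfuel rs' m'' hr
      rcases hrs : seqF n cs save m with ⟨rest, c1, m1⟩
      have HS := ihS cs save m (save :: s) (by omega) rest c1 m1 hrs
      rcases HS.2 with ⟨hnil, hmap⟩ | ⟨pre, t, hcs, hsh, hbal, hfoldS⟩
      · subst hnil
        rw [altsF_nil n cs save c1 m m1 hrs] at hr
        simp only [Prod.mk.injEq] at hr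
        obtain ⟨e1, e2⟩ := hr
        subst e1; subst e2
        exact ⟨by simp, Or.inl ⟨rfl, hmap⟩⟩
      · rcases hsh with hsh | hsh
        · -- rest = ')' :: t
          subst hsh
          rw [altsF_close n cs t save c1 m m1 hrs] at hr
          simp only [Prod.mk.injEq] at hr
          obtain ⟨e1, e2⟩ := hr
          subst e1; subst e2
          constructor
          · rw [hcs]; simp; omega
          · refine Or.inr ⟨pre ++ [')'], ?_, ?_, ?_⟩
            · simp [hcs]
            · simp only [opensC, closesC] at hbal ⊢
              simp [List.count_append]
              omega
            · rw [hfoldS]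
              simp [List.foldl_cons, stepA_close]
        · -- rest = '|' :: t
          subst hsh
          rw [altsF_bar n cs t save c1 m m1 hrs] at hr
          have hlen : t.length + 1 ≤ cs.length := by have := HS.1; simpa using this
          have HA := ihA t save m1 s (by omega) rs' m'' hr
          have hfold2 : List.foldl stepA (save :: s, c1, m1) ('|' :: t)
              = List.foldl stepA (save :: s, save, m1) t := by
            simp [List.foldl_cons, stepA_bar]
          constructor
          · have := HA.1; omega
          · rcases HA.2 with ⟨hnil2, hmap2⟩ | ⟨pre2, hcs2, hbal2, hfold3⟩
            · refine Or.inl ⟨hnil2, ?_⟩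
              rw [hfoldS, hfold2]; exact hmap2
            · refine Or.inr ⟨pre ++ '|' :: pre2, ?_, ?_, ?_⟩
              · simp [hcs, hcs2]
              · simp only [opensC, closesC] at hbal hbal2 ⊢
                simp [List.count_append]
                omega
              · rw [hfoldS, hfold2, hfold3]

-- ===== VERDICT (by name: the statement is the Claim_ definition above) =====
theorem parse_spec : Claim_equal_parse := by
  intro regex _ hpre
  unfold Spec_parse parse parse_alt
  rcases hr : seqF (2 * regex.toList.length + 2) regex.toList (0, 0) PySem.Dict.empty
    with ⟨rest, c', m'⟩
  have H := (mainAux (2 * regex.toList.length + 2)).1 regex.toList (0, 0) PySem.Dict.empty []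
    (by omega) rest c' m' hr
  rcases H.2 with ⟨-, hm⟩ | ⟨pre, t, hcs, hshape, hbal, -⟩
  · rw [hm]
  · exfalso
    have hi : pre.length < regex.toList.length := by
      rcases hshape with h | h <;> rw [h] at hcs <;> rw [hcs] <;> simp
    have hch : regex.toList.getD pre.length ' ' = ')' ∨ regex.toList.getD pre.length ' ' = '|' := by
      rcases hshape with h | h <;> rw [h] at hcs <;> rw [hcs] <;>
        [left; right] <;> simp [List.getD_eq_getElem?_getD]
    have hlt := hpre pre.length hi hch
    have htake : regex.toList.take pre.length = pre := by rw [hcs]; exact List.take_left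
    rw [htake] at hlt
    omega
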